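-- pv_equiv track=rewrite | github.com/shaijing/trans | data.py | _word2id
-- ===== SOURCE A (Python) =====
-- UNK = 1  # 未登录词标识符的索引
--
-- def _word2id(en, cn, en_dict, cn_dict, sort=True):
--     """
--     传入一系列语句数据(分好词的列表形式)，
--     按照语句长度排序后，返回排序后原来各语句在数据中的索引下标
--     """
--     out_en_ids = [[en_dict.get(word, UNK) for word in sent] for sent in en]
--     out_cn_ids = [[cn_dict.get(word, UNK) for word in sent] for sent in cn]
--
--     def arg_sort(seq):
--         """
--         传入一系列语句数据(分好词的列表形式)，
--         按照语句长度排序后，返回排序后原来各语句在数据中的索引下标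
--         """
--         return sorted(range(len(seq)), key=lambda x: len(seq[x]))
--
--     # 按相同顺序对中文、英文样本排序
--     if sort:
--         # 以英文语句长度排序
--         sorted_index = arg_sort(out_en_ids)
--         out_en_ids = [out_en_ids[idx] for idx in sorted_index]
--         out_cn_ids = [out_cn_ids[idx] for idx in sorted_index]
--     return out_en_ids, out_cn_ids
-- ===== SOURCE B (Python) =====
-- UNK = 1
--
-- def _word2id(en, cn, en_dict, cn_dict, sort=True):
--     out_en_ids = [[en_dict.get(word, UNK) for word in sent] for sent in en]
--     out_cn_ids = [[cn_dict.get(word, UNK) for word in sent] for sent in cn]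
--     if sort:
--         # bucket (counting) sort: group pairs by English length, then emit
--         # buckets in increasing length order; no comparison sort of sentences.
--         keyed = [(len(e), (e, c)) for e, c in zip(out_en_ids, out_cn_ids)]
--         buckets = {}
--         for k, p in keyed:
--             buckets[k] = buckets.get(k, []) + [p]
--         out_en_ids, out_cn_ids = [], []
--         for k in sorted(buckets):
--             for e, c in buckets[k]:
--                 out_en_ids.append(e)
--                 out_cn_ids.append(c)
--     return out_en_ids, out_cn_ids
-- ===== Notes on version B (the rewrite author's own statement) =====
-- stated objective: alternative
-- what changed: B replaces A's comparison arg-sort + index permutation with a bucket (counting) sort: pairs are grouped into a dict of buckets keyed by English length and emitted bucket by bucket in increasing key order (stable by construction).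
import Mathlib
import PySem

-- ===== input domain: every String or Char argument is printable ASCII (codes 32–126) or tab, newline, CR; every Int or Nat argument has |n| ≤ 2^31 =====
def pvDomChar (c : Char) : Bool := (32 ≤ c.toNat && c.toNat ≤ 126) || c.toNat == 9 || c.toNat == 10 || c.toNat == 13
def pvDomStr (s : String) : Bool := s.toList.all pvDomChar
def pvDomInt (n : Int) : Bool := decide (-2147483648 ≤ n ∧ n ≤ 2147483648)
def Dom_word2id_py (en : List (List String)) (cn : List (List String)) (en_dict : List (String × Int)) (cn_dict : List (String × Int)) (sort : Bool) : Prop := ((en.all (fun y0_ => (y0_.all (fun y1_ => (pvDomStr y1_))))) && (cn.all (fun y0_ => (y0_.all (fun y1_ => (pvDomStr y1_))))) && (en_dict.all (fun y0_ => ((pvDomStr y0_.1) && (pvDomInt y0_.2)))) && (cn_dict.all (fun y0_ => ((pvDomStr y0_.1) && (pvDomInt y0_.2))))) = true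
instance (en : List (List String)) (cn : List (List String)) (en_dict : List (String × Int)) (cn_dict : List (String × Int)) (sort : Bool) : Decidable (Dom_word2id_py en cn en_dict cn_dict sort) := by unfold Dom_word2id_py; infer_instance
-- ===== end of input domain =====

-- B replaces A's comparison arg-sort + index permutation by a bucket (counting) sort over a dict of
-- length-keyed buckets (stable by construction); equivalence of the return value where A returns normally.

-- ===== PORT A =====
def word2id_py (en : List (List String)) (cn : List (List String)) (en_dict : List (String × Int)) (cn_dict : List (String × Int)) (sort : Bool) : List (List Int) × List (List Int) :=
  let out_en_ids := en.map (fun sent => sent.map (fun word => PySem.Dict.getD (PySem.Dict.ofList en_dict) word 1))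
  let out_cn_ids := cn.map (fun sent => sent.map (fun word => PySem.Dict.getD (PySem.Dict.ofList cn_dict) word 1))
  if sort then
    -- arg_sort: sorted(range(len(seq)), key=lambda x: len(seq[x]))
    let sorted_index := PySem.List.sorted (PySem.List.pyRange 0 (out_en_ids.length : Int) 1) (fun x => ((PySem.List.pyGetD out_en_ids x []).length : Int)) false
    (sorted_index.map (fun idx => PySem.List.pyGetD out_en_ids idx []),
     sorted_index.map (fun idx => PySem.List.pyGetD out_cn_ids idx []))
  else (out_en_ids, out_cn_ids)

-- ===== PORT B =====
def word2id_py_alt (en : List (List String)) (cn : List (List String)) (en_dict : List (String × Int)) (cn_dict : List (String × Int)) (sort : Bool) : List (List Int) × List (List Int) :=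
  let out_en_ids := en.map (fun sent => sent.map (fun word => PySem.Dict.getD (PySem.Dict.ofList en_dict) word 1))
  let out_cn_ids := cn.map (fun sent => sent.map (fun word => PySem.Dict.getD (PySem.Dict.ofList cn_dict) word 1))
  if sort then
    let keyed := (out_en_ids.zip out_cn_ids).map (fun p => ((p.1.length : Int), p))
    let buckets := keyed.foldl (fun d q => PySem.Dict.modify d q.1 [] (· ++ [q.2])) PySem.Dict.empty
    let ks := PySem.List.sorted (PySem.Dict.keys buckets) (fun k => k) false
    let pairs := ks.flatMap (fun k => PySem.Dict.getD buckets k [])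
    (pairs.map Prod.fst, pairs.map Prod.snd)
  else (out_en_ids, out_cn_ids)

-- ===== PRECONDITION & SPEC =====
-- Pre_ excludes exactly the inputs where A raises IndexError: with sort=True and len(cn) < len(en),
-- A indexes out_cn_ids with an English index past the end of cn.
def Pre_word2id_py (en : List (List String)) (cn : List (List String)) (en_dict : List (String × Int)) (cn_dict : List (String × Int)) (sort : Bool) : Prop := sort = true → en.length ≤ cn.length
instance (en : List (List String)) (cn : List (List String)) (en_dict : List (String × Int)) (cn_dict : List (String × Int)) (sort : Bool) : Decidable (Pre_word2id_py en cn en_dict cn_dict sort) := by unfold Pre_word2id_py; infer_instance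

def pvWitness_word2id_py : List (List String) × List (List String) × (List (String × Int)) × (List (String × Int)) × Bool :=
  ([["a", "b"], ["a"]], [["x"], ["y", "z"]], [("a", 2)], [("y", 3)], true)

def Spec_word2id_py (en : List (List String)) (cn : List (List String)) (en_dict : List (String × Int)) (cn_dict : List (String × Int)) (sort : Bool) (out : List (List Int) × List (List Int)) : Prop := out = word2id_py_alt en cn en_dict cn_dict sort
instance (en : List (List String)) (cn : List (List String)) (en_dict : List (String × Int)) (cn_dict : List (String × Int)) (sort : Bool) (out : List (List Int) × List (List Int)) : Decidable (Spec_word2id_py en cn en_dict cn_dict sort out) := by unfold Spec_word2id_py; infer_instance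

-- ===== CLAIM (what is proved, stated in full; the proofs are below) =====
def Claim_equal_word2id_py : Prop := ∀ (en : List (List String)) (cn : List (List String)) (en_dict : List (String × Int)) (cn_dict : List (String × Int)) (sort : Bool), Dom_word2id_py en cn en_dict cn_dict sort → Pre_word2id_py en cn en_dict cn_dict sort → Spec_word2id_py en cn en_dict cn_dict sort (word2id_py en cn en_dict cn_dict sort)
-- ===== LEMMAS AND PROOFS =====

-- filtering one key class commutes with one stable insertion into a key-sorted list
theorem pv_filter_insertBy {α : Type} (key : α → Int) (x : α) (s : List α) (c : Int)
    (hs : s.Pairwise (fun a b => key a ≤ key b)) :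
    (PySem.List.insertBy (fun a b => decide (key a < key b)) x s).filter (fun y => key y == c)
      = s.filter (fun y => key y == c) ++ (if key x == c then [x] else []) := by
  induction s with
  | nil =>
    simp only [PySem.List.insertBy, List.filter_cons, List.filter_nil]
    by_cases hc : (key x == c) = true <;> simp [hc]
  | cons y t ih =>
    rcases List.pairwise_cons.mp hs with ⟨hy, ht⟩
    simp only [PySem.List.insertBy]
    by_cases h : key x < key y
    · simp only [h, decide_true, if_true]
      by_cases hc : (key x == c) = true
      · have hnil : (y :: t).filter (fun z => key z == c) = [] := by
          apply List.filter_eq_nil_iff.mpr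
          intro z hz
          have hle : key y ≤ key z := by
            rcases List.mem_cons.mp hz with h1 | h1
            · subst h1; exact le_refl _
            · exact hy z h1
          have hkx : key x = c := by simpa using hc
          simp only [beq_iff_eq]
          omega
        rw [List.filter_cons_of_pos (by simpa using hc), hnil]
        simp [hc]
      · rw [List.filter_cons_of_neg (by simpa using hc)]
        simp [hc]
    · simp only [h, decide_false, Bool.false_eq_true, if_false]
      rw [List.filter_cons, List.filter_cons, ih ht]
      by_cases hyc : (key y == c) = true <;> simp [hyc]

-- filtering one key class commutes with the whole stable sort
theorem pv_filter_sorted {α : Type} (key : α → Int) (l : List α) (c : Int) :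
    (PySem.List.sorted l key false).filter (fun y => key y == c) = l.filter (fun y => key y == c) := by
  induction l using List.reverseRecOn with
  | nil => rfl
  | append_singleton t x ih =>
    have hstep : PySem.List.sorted (t ++ [x]) key false
        = PySem.List.insertBy (fun a b => decide (key a < key b)) x (PySem.List.sorted t key false) := by
      rw [PySem.List.sorted_eq_foldl_insertBy, PySem.List.sorted_eq_foldl_insertBy, List.foldl_append]
      rfl
    rw [hstep, pv_filter_insertBy key x _ c (PySem.List.sorted_pairwise t key),
        ih, List.filter_append]
    by_cases hc : key x = c <;> simp [hc]

-- a key-sorted list with minimal key k splits as (key = k) ++ (key ≠ k)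
theorem pv_split_min {α : Type} (key : α → Int) (k : Int) (s : List α)
    (hs : s.Pairwise (fun a b => key a ≤ key b)) (hmin : ∀ x ∈ s, k ≤ key x) :
    s = s.filter (fun y => key y == k) ++ s.filter (fun y => !(key y == k)) := by
  induction s with
  | nil => rfl
  | cons x t ih =>
    rcases List.pairwise_cons.mp hs with ⟨hx, ht⟩
    by_cases hk : key x = k
    · have := ih ht (fun z hz => hmin z (List.mem_cons_of_mem x hz))
      simp only [List.filter, hk, beq_self_eq_true, Bool.not_true]
      simpa using this
    · have hgt : k < key x := lt_of_le_of_ne (hmin x (List.mem_cons_self)) (Ne.symm hk)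
      have hall : ∀ z ∈ x :: t, ¬(key z = k) := by
        intro z hz
        rcases List.mem_cons.mp hz with h1 | h1
        · subst h1; exact hk
        · have := hx z h1; omega
      have h1 : (x :: t).filter (fun y => key y == k) = [] := by
        apply List.filter_eq_nil_iff.mpr
        intro z hz
        simpa using hall z hz
      have h2 : (x :: t).filter (fun y => !(key y == k)) = x :: t := by
        apply List.filter_eq_self.mpr
        intro z hz
        simpa using hall z hz
      rw [h1, h2, List.nil_append]

-- a key-sorted list is the concatenation of its key classes in strictly increasing key order
theorem pv_flatMap_buckets {α : Type} (key : α → Int) (K : List Int) (s : List α)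
    (hs : s.Pairwise (fun a b => key a ≤ key b))
    (hK : K.Pairwise (· < ·))
    (hmem : ∀ x ∈ s, key x ∈ K) :
    s = K.flatMap (fun k => s.filter (fun y => key y == k)) := by
  induction K generalizing s with
  | nil =>
    cases s with
    | nil => rfl
    | cons x t => exact absurd (hmem x List.mem_cons_self) (List.not_mem_nil)
  | cons k K' ih =>
    rcases List.pairwise_cons.mp hK with ⟨hkK, hK'⟩
    have hmin : ∀ x ∈ s, k ≤ key x := by
      intro x hx
      rcases List.mem_cons.mp (hmem x hx) with h | h
      · omega
      · exact le_of_lt (hkK _ h)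
    have hsplit := pv_split_min key k s hs hmin
    have hs' : (s.filter (fun y => !(key y == k))).Pairwise (fun a b => key a ≤ key b) :=
      hs.sublist List.filter_sublist
    have hmem' : ∀ x ∈ s.filter (fun y => !(key y == k)), key x ∈ K' := by
      intro x hx
      rcases List.mem_filter.mp hx with ⟨hxs, hxk⟩
      rcases List.mem_cons.mp (hmem x hxs) with h | h
      · simp [h] at hxk
      · exact h
    have hrec := ih (s.filter (fun y => !(key y == k))) hs' hK' hmem'
    have hcls : ∀ k' ∈ K',
        (s.filter (fun y => !(key y == k))).filter (fun y => key y == k')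
          = s.filter (fun y => key y == k') := by
      intro k' hk'
      have hne : k' ≠ k := by have := hkK _ hk'; omega
      rw [List.filter_filter]
      apply List.filter_congr
      intro z _
      by_cases h : key z = k' <;> simp [h, hne]
    calc s = s.filter (fun y => key y == k) ++ s.filter (fun y => !(key y == k)) := hsplit
      _ = s.filter (fun y => key y == k)
            ++ K'.flatMap (fun k' => (s.filter (fun y => !(key y == k))).filter (fun y => key y == k')) := by
            rw [← hrec]
      _ = s.filter (fun y => key y == k) ++ K'.flatMap (fun k' => s.filter (fun y => key y == k')) := by
            congr 1
            exact List.flatMap_congr (fun k' hk' => hcls k' hk')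
      _ = (k :: K').flatMap (fun k' => s.filter (fun y => key y == k')) := by
            simp [List.flatMap_cons]

-- stable sort by key = buckets emitted in increasing key order
theorem pv_sorted_eq_buckets {α : Type} (key : α → Int) (l : List α) :
    PySem.List.sorted l key false
      = (PySem.List.sorted (PySem.Set.ofList (l.map key)) (fun k => k) false).flatMap
          (fun k => l.filter (fun y => key y == k)) := by
  have hpairs := pv_flatMap_buckets key
      (PySem.List.sorted (PySem.Set.ofList (l.map key)) (fun k => k) false)
      (PySem.List.sorted l key false)
      (PySem.List.sorted_pairwise l key)
      (PySem.List.sorted_ofList_pairwise_lt (l.map key))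
      (by
        intro x hx
        rw [PySem.List.mem_sorted]
        exact (PySem.Set.mem_ofList _ _).mpr (List.mem_map_of_mem ((PySem.List.mem_sorted _ _ _ _).mp hx)))
  rw [hpairs]
  exact List.flatMap_congr (fun k _ => pv_filter_sorted key l k)

-- insertBy commutes with map when the predicate only looks through the mapped value
theorem pv_insertBy_map {α β : Type} (f : α → β) (bf : β → β → Bool) (x : α) (ys : List α) :
    PySem.List.insertBy bf (f x) (ys.map f) = (PySem.List.insertBy (fun a b => bf (f a) (f b)) x ys).map f := by
  induction ys with
  | nil => rfl
  | cons y ys ih =>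
    simp only [List.map_cons, PySem.List.insertBy]
    by_cases h : bf (f x) (f y) <;> simp [h, ih]

-- sorted of a mapped list = map of sorted under the composed key
theorem pv_sorted_map {α β κ : Type} [LT κ] [DecidableLT κ] (f : α → β) (k : β → κ) (l : List α) :
    PySem.List.sorted (l.map f) k false = (PySem.List.sorted l (fun a => k (f a)) false).map f := by
  rw [PySem.List.sorted_eq_foldl_insertBy, PySem.List.sorted_eq_foldl_insertBy]
  suffices h : ∀ (acc : List α),
      (l.map f).foldl (fun acc x => PySem.List.insertBy (fun a b => decide (k a < k b)) x acc) (acc.map f)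
        = (l.foldl (fun acc x => PySem.List.insertBy (fun a b => decide (k (f a) < k (f b))) x acc) acc).map f by
    simpa using h []
  induction l with
  | nil => intro acc; rfl
  | cons y l ih =>
    intro acc
    simp only [List.map_cons, List.foldl_cons]
    rw [pv_insertBy_map f (fun a b => decide (k a < k b)) y acc]
    exact ih _

-- zip as a map over the index range (when the left list is not longer)
theorem pv_zip_eq_map_range {α : Type} (a b : List (List α)) (h : a.length ≤ b.length) :
    a.zip b = (PySem.List.pyRange 0 (a.length : Int) 1).map
      (fun i => (PySem.List.pyGetD a i [], PySem.List.pyGetD b i [])) := by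
  rw [PySem.List.pyRange_one]
  apply List.ext_getElem
  · simp [List.length_zip]; omega
  · intro i hi1 hi2
    simp only [List.getElem_map, List.getElem_range, List.getElem_zip]
    have hia : i < a.length := by simp [List.length_zip] at hi1; omega
    have hib : i < b.length := by omega
    have : ((0 : Int) + (i : Int)) = ((i : Nat) : Int) := by omega
    rw [this, PySem.List.pyGetD_natCast, PySem.List.pyGetD_natCast]
    simp [List.getD, hia, hib]

-- B's bucket pipeline computes the stable sort of the zipped pairs by English length
theorem pv_alt_pairs (z : List (List Int × List Int)) :
    (PySem.List.sorted
        (PySem.Dict.keys ((z.map (fun p => ((p.1.length : Int), p))).foldl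
          (fun d q => PySem.Dict.modify d q.1 [] (· ++ [q.2])) PySem.Dict.empty))
        (fun k => k) false).flatMap
      (fun k => PySem.Dict.getD ((z.map (fun p => ((p.1.length : Int), p))).foldl
          (fun d q => PySem.Dict.modify d q.1 [] (· ++ [q.2])) PySem.Dict.empty) k [])
      = PySem.List.sorted z (fun p => (p.1.length : Int)) false := by
  have hkeys : PySem.Dict.keys ((z.map (fun p => ((p.1.length : Int), p))).foldl
      (fun d q => PySem.Dict.modify d q.1 [] (· ++ [q.2])) PySem.Dict.empty)
      = PySem.Set.ofList (z.map (fun p => (p.1.length : Int))) := by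
    rw [PySem.Dict.keys_foldl_modify_key (z.map (fun p => ((p.1.length : Int), p))) Prod.fst [] (fun _ q v => v ++ [q.2]), PySem.Dict.keys_empty, PySem.Set.update_nil_left,
        List.map_map]
    rfl
  have hgetD : ∀ c : Int,
      PySem.Dict.getD ((z.map (fun p => ((p.1.length : Int), p))).foldl
        (fun d q => PySem.Dict.modify d q.1 [] (· ++ [q.2])) PySem.Dict.empty) c []
      = z.filter (fun p => (p.1.length : Int) == c) := by
    intro c
    rw [PySem.Dict.getD_foldl_modify_append, PySem.Dict.getD_empty, List.nil_append,
        List.filter_map, List.map_map]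
    simp [Function.comp_def]
  rw [hkeys]
  rw [pv_sorted_eq_buckets (fun p => (p.1.length : Int)) z]
  exact List.flatMap_congr (fun k _ => hgetD k)

-- ===== VERDICT (by name: the statement is the Claim_ definition above) =====
theorem word2id_py_spec : Claim_equal_word2id_py := by
  intro en cn en_dict cn_dict sort _ hpre
  unfold Spec_word2id_py word2id_py word2id_py_alt
  cases sort with
  | false => rfl
  | true =>
    simp only [if_true]
    set a := en.map (fun sent => sent.map (fun word => PySem.Dict.getD (PySem.Dict.ofList en_dict) word 1)) with ha
    set b := cn.map (fun sent => sent.map (fun word => PySem.Dict.getD (PySem.Dict.ofList cn_dict) word 1)) with hb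
    have hlen : a.length ≤ b.length := by
      simpa [ha, hb] using hpre rfl
    rw [pv_alt_pairs (a.zip b),
        pv_zip_eq_map_range a b hlen,
        pv_sorted_map (fun i => (PySem.List.pyGetD a i [], PySem.List.pyGetD b i []))
          (fun p => (p.1.length : Int)) (PySem.List.pyRange 0 (a.length : Int) 1)]
    simp [List.map_map, Function.comp_def]
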